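-- pv_equiv track=rewrite | github.com/Dhivesh18/PlacementCodes | CISCO_Next_True_Number.py | true_number_method_1
-- ===== SOURCE A (Python) =====
-- def true_number_method_1(n):
--     t=q=0
--     o=m=n
--     while t==0:
--         for i in [int(i) for i in str(n)]:
--             if i%2!=0:
--                 n-=1
--                 t=0
--                 break
--             t=1
--     while q==0:
--         for i in [int(i) for i in str(m)]:
--             if i%2!=0:
--                 m+=1
--                 q=0
--                 break
--             q=1
--     return min(o-n, m-o)
-- ===== SOURCE B (Python) =====
-- def true_number_method_1(n):
--     def all_even(m):
--         return all(int(c) % 2 == 0 for c in str(m))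
--     d = 0
--     while not (all_even(n - d) or all_even(n + d)):
--         d += 1
--     return d
-- ===== Notes on version B (the rewrite author's own statement) =====
-- stated objective: faster
-- what changed: A walks downward and upward in two independent while-loops to the nearest all-even-digit numbers and takes the min of the distances; B does one outward scan over the distance d, stopping at the first d where n-d or n+d has all even digits, so it scans min(d_down,d_up) numbers instead of d_down+d_up.
import Mathlib
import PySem

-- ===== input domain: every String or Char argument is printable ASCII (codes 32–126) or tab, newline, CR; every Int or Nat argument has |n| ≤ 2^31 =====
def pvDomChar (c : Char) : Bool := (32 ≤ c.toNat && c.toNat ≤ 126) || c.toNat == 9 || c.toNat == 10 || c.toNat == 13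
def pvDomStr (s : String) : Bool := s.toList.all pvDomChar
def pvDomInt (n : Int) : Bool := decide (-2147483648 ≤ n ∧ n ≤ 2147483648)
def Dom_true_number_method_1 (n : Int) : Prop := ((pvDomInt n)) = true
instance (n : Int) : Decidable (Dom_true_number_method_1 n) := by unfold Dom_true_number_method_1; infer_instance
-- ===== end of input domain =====

-- B replaces A's two independent directional walks by one outward scan over the distance;
-- equivalence of the return value is proved on Pre_ (0 ≤ n).

-- ===== PORT A =====
-- [int(i) for i in str(m)]; int(c) for a decimal digit char c is c.toNat - 48 (exact on 0 ≤ m)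
def pyDigitsA (m : Int) : List Int :=
  (PySem.Int.toStr m).toList.map (fun c => ((c.toNat : Int) - 48))

-- A's inner for-loop with the break flag: true = flag set to 1 (all digits even), false = break taken
def scanDigits : List Int → Bool
  | [] => true
  | i :: rest => if i % 2 ≠ 0 then false else scanDigits rest

-- A's first while-loop (n -= 1 until all digits even); fuel only makes the recursion total,
-- it is large enough for every input admitted by Dom ∧ Pre
def downLoopA : Nat → Int → Int
  | 0, n => n
  | f + 1, n => if scanDigits (pyDigitsA n) then n else downLoopA f (n - 1)

-- A's second while-loop (m += 1 until all digits even)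
def upLoopA : Nat → Int → Int
  | 0, m => m
  | f + 1, m => if scanDigits (pyDigitsA m) then m else upLoopA f (m + 1)

def true_number_method_1 (n : Int) : Int :=
  let o := n
  let nd := downLoopA (2 ^ 33) n
  let mu := upLoopA (2 ^ 33) n
  min (o - nd) (mu - o)

-- ===== PORT B =====
-- all(int(c) % 2 == 0 for c in str(m))
def allEvenAlt (m : Int) : Bool :=
  (PySem.Int.toStr m).toList.all (fun c => ((c.toNat : Int) - 48) % 2 == 0)

-- B's while-loop over the distance d; fuel is a totality guard only
def altLoop : Nat → Int → Int → Int
  | 0, _, d => d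
  | f + 1, n, d => if allEvenAlt (n - d) || allEvenAlt (n + d) then d else altLoop f n (d + 1)

def true_number_method_1_alt (n : Int) : Int := altLoop (2 ^ 33) n 0

-- ===== PRECONDITION & SPEC =====
-- Python A raises ValueError (int('-')) as soon as a scanned number is negative, i.e. on all n < 0.
def Pre_true_number_method_1 (n : Int) : Prop := 0 ≤ n
instance (n : Int) : Decidable (Pre_true_number_method_1 n) := by
  unfold Pre_true_number_method_1; infer_instance

def pvWitness_true_number_method_1 : Int := (3)

def Spec_true_number_method_1 (n : Int) (out : Int) : Prop := out = true_number_method_1_alt n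
instance (n : Int) (out : Int) : Decidable (Spec_true_number_method_1 n out) := by
  unfold Spec_true_number_method_1; infer_instance

-- ===== CLAIM (what is proved, stated in full; the proofs are below) =====
def Claim_equal_true_number_method_1 : Prop :=
  ∀ (n : Int), Dom_true_number_method_1 n → Pre_true_number_method_1 n →
    Spec_true_number_method_1 n (true_number_method_1 n)

-- ===== LEMMAS AND PROOFS =====

lemma scanDigits_eq_all (l : List Int) : scanDigits l = l.all (fun i => i % 2 == 0) := by
  induction l with
  | nil => rfl
  | cons i rest ih =>
    simp only [scanDigits, List.all_cons, ih]
    by_cases h : i % 2 = 0 <;> simp [h]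

lemma allEvenAlt_eq (m : Int) : allEvenAlt m = scanDigits (pyDigitsA m) := by
  rw [allEvenAlt, pyDigitsA, scanDigits_eq_all, List.all_map]
  rfl

lemma downLoopA_spec (k : Nat) : ∀ (fuel : Nat) (n : Int), k < fuel →
    scanDigits (pyDigitsA (n - k)) = true →
    (∀ j : Nat, j < k → scanDigits (pyDigitsA (n - j)) = false) →
    downLoopA fuel n = n - k := by
  induction k with
  | zero =>
    intro fuel n hf hk _
    obtain ⟨f, rfl⟩ : ∃ f, fuel = f + 1 := ⟨fuel - 1, by omega⟩
    simp only [downLoopA]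
    simp only [Nat.cast_zero, sub_zero] at hk
    simp [hk]
  | succ k ih =>
    intro fuel n hf hk hmin
    obtain ⟨f, rfl⟩ : ∃ f, fuel = f + 1 := ⟨fuel - 1, by omega⟩
    simp only [downLoopA]
    have h0 : scanDigits (pyDigitsA (n - (0 : Nat))) = false := hmin 0 (Nat.succ_pos k)
    simp only [Nat.cast_zero, sub_zero] at h0
    rw [h0]
    simp only [Bool.false_eq_true, if_false]
    have heq : ∀ j : Nat, n - 1 - (j : Int) = n - ((j + 1 : Nat) : Int) := by
      intro j; push_cast; ring
    have := ih f (n - 1) (Nat.lt_of_succ_lt_succ hf)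
      (by rw [heq]; exact hk)
      (fun j hj => by rw [heq]; exact hmin (j + 1) (Nat.succ_lt_succ hj))
    rw [this, heq]

lemma upLoopA_spec (k : Nat) : ∀ (fuel : Nat) (m : Int), k < fuel →
    scanDigits (pyDigitsA (m + k)) = true →
    (∀ j : Nat, j < k → scanDigits (pyDigitsA (m + j)) = false) →
    upLoopA fuel m = m + k := by
  induction k with
  | zero =>
    intro fuel m hf hk _
    obtain ⟨f, rfl⟩ : ∃ f, fuel = f + 1 := ⟨fuel - 1, by omega⟩
    simp only [upLoopA]
    simp only [Nat.cast_zero, add_zero] at hk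
    simp [hk]
  | succ k ih =>
    intro fuel m hf hk hmin
    obtain ⟨f, rfl⟩ : ∃ f, fuel = f + 1 := ⟨fuel - 1, by omega⟩
    simp only [upLoopA]
    have h0 : scanDigits (pyDigitsA (m + (0 : Nat))) = false := hmin 0 (Nat.succ_pos k)
    simp only [Nat.cast_zero, add_zero] at h0
    rw [h0]
    simp only [Bool.false_eq_true, if_false]
    have heq : ∀ j : Nat, m + 1 + (j : Int) = m + ((j + 1 : Nat) : Int) := by
      intro j; push_cast; ring
    have := ih f (m + 1) (Nat.lt_of_succ_lt_succ hf)
      (by rw [heq]; exact hk)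
      (fun j hj => by rw [heq]; exact hmin (j + 1) (Nat.succ_lt_succ hj))
    rw [this, heq]

lemma altLoop_spec (k : Nat) : ∀ (fuel : Nat) (n d : Int), k < fuel →
    (allEvenAlt (n - (d + k)) || allEvenAlt (n + (d + k))) = true →
    (∀ j : Nat, j < k → (allEvenAlt (n - (d + j)) || allEvenAlt (n + (d + j))) = false) →
    altLoop fuel n d = d + k := by
  induction k with
  | zero =>
    intro fuel n d hf hk _
    obtain ⟨f, rfl⟩ : ∃ f, fuel = f + 1 := ⟨fuel - 1, by omega⟩
    simp only [altLoop]
    simp only [Nat.cast_zero, add_zero] at hk ⊢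
    simp [hk]
  | succ k ih =>
    intro fuel n d hf hk hmin
    obtain ⟨f, rfl⟩ : ∃ f, fuel = f + 1 := ⟨fuel - 1, by omega⟩
    simp only [altLoop]
    have h0 := hmin 0 (Nat.succ_pos k)
    simp only [Nat.cast_zero, add_zero] at h0
    rw [h0]
    simp only [Bool.false_eq_true, if_false]
    have heq : ∀ j : Nat, d + 1 + (j : Int) = d + ((j + 1 : Nat) : Int) := by
      intro j; push_cast; ring
    have := ih f n (d + 1) (Nat.lt_of_succ_lt_succ hf)
      (by rw [heq]; exact hk)
      (fun j hj => by rw [heq]; exact hmin (j + 1) (Nat.succ_lt_succ hj))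
    rw [this, heq]

lemma allEvenB_zero : scanDigits (pyDigitsA 0) = true := by decide

lemma allEvenB_big : scanDigits (pyDigitsA 2200000000) = true := by decide

-- ===== VERDICT (by name: the statement is the Claim_ definition above) =====
theorem true_number_method_1_spec : Claim_equal_true_number_method_1 := by
  intro n hdom hpre
  unfold Spec_true_number_method_1 true_number_method_1 true_number_method_1_alt
  have hn0 : (0 : Int) ≤ n := hpre
  have hn : n ≤ 2147483648 := by
    unfold Dom_true_number_method_1 pvDomInt at hdom
    simpa using (of_decide_eq_true hdom).2
  -- existence of an all-even-digit number below (0) and above (2200000000)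
  have hd : ∃ k : Nat, scanDigits (pyDigitsA (n - k)) = true :=
    ⟨n.toNat, by rw [Int.toNat_of_nonneg hn0, sub_self]; exact allEvenB_zero⟩
  have hu : ∃ k : Nat, scanDigits (pyDigitsA (n + k)) = true :=
    ⟨(2200000000 - n).toNat, by
      rw [Int.toNat_of_nonneg (by omega)]
      have : n + (2200000000 - n) = 2200000000 := by ring
      rw [this]; exact allEvenB_big⟩
  set kd := Nat.find hd with hkd
  set ku := Nat.find hu with hku
  have hkd_le : kd ≤ n.toNat := Nat.find_min' hd (by
    rw [Int.toNat_of_nonneg hn0, sub_self]; exact allEvenB_zero)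
  have hku_le : ku ≤ (2200000000 - n).toNat := Nat.find_min' hu (by
    rw [Int.toNat_of_nonneg (by omega)]
    have : n + (2200000000 - n) = 2200000000 := by ring
    rw [this]; exact allEvenB_big)
  have hkd_f : kd < 2 ^ 33 := by
    have : n.toNat ≤ 2147483648 := by omega
    omega
  have hku_f : ku < 2 ^ 33 := by
    have : (2200000000 - n).toNat ≤ 2200000000 := by omega
    omega
  have hdownv := downLoopA_spec kd (2 ^ 33) n hkd_f (Nat.find_spec hd)
    (fun j hj => by
      have := Nat.find_min hd hj
      exact Bool.not_eq_true _ ▸ Bool.eq_false_iff.mpr this)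
  have hupv := upLoopA_spec ku (2 ^ 33) n hku_f (Nat.find_spec hu)
    (fun j hj => by
      have := Nat.find_min hu hj
      exact Bool.not_eq_true _ ▸ Bool.eq_false_iff.mpr this)
  -- B's loop stops exactly at min kd ku
  have hmf : min kd ku < 2 ^ 33 := lt_of_le_of_lt (min_le_left _ _) hkd_f
  have hPmin : (allEvenAlt (n - ((0 : Int) + (min kd ku : Nat))) ||
      allEvenAlt (n + ((0 : Int) + (min kd ku : Nat)))) = true := by
    rcases le_total kd ku with h | h
    · rw [min_eq_left h]
      have := Nat.find_spec hd
      rw [allEvenAlt_eq, zero_add, this]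
      simp
    · rw [min_eq_right h]
      have := Nat.find_spec hu
      rw [Bool.or_eq_true]
      right
      rw [allEvenAlt_eq, zero_add]
      exact this
  have hPmin' : ∀ j : Nat, j < min kd ku →
      (allEvenAlt (n - ((0 : Int) + j)) || allEvenAlt (n + ((0 : Int) + j))) = false := by
    intro j hj
    have hj1 : j < kd := lt_of_lt_of_le hj (min_le_left _ _)
    have hj2 : j < ku := lt_of_lt_of_le hj (min_le_right _ _)
    have h1 : scanDigits (pyDigitsA (n - j)) = false :=
      Bool.eq_false_iff.mpr (Nat.find_min hd hj1)
    have h2 : scanDigits (pyDigitsA (n + j)) = false :=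
      Bool.eq_false_iff.mpr (Nat.find_min hu hj2)
    rw [zero_add, allEvenAlt_eq, allEvenAlt_eq, h1, h2]
    rfl
  have hb : altLoop (2 ^ 33) n 0 = (0 : Int) + (min kd ku : Nat) :=
    altLoop_spec (min kd ku) (2 ^ 33) n 0 hmf hPmin hPmin'
  rw [hb]
  simp only [hdownv, hupv, zero_add]
  have : n - (n - (kd : Int)) = (kd : Int) := by ring
  rw [this]
  have : n + (ku : Int) - n = (ku : Int) := by ring
  rw [this]
  rw [Nat.cast_min]
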